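-- pv_equiv track=rewrite | github.com/DavidHuarino/advent-of-code-python-starter | aoc/day06/part1.py | result
-- ===== SOURCE A (Python) =====
-- from collections import defaultdict
--
-- def result(input):
--     seen = defaultdict(int)
--     start = 0
--     for end, char in enumerate(input):
--         seen[char] += 1
--         if end - start + 1 > 4:
--             seen[input[start]] -= 1
--             if seen[input[start]] == 0:
--                 del seen[input[start]]
--             start += 1
--         if end - start + 1 == 4 and len(seen) == 4:
--             return end + 1
-- ===== SOURCE B (Python) =====
-- def result(input):
--     for i in range(4, len(input) + 1):
--         if len(set(input[i - 4:i])) == 4: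
--             return i
-- ===== Notes on version B (the rewrite author's own statement) =====
-- stated objective: simpler
-- what changed: B drops A's incremental sliding-window counter dict entirely and instead checks each 4-character slice afresh with len(set(window)) == 4 over range(4, len(input)+1); Pre_ excludes inputs with no 4-distinct-character window, on which both A and B fall through and return None, which is not an int.
-- outside the precondition, e.g. on result('aabb'): A returns None, B returns None
import Mathlib
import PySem

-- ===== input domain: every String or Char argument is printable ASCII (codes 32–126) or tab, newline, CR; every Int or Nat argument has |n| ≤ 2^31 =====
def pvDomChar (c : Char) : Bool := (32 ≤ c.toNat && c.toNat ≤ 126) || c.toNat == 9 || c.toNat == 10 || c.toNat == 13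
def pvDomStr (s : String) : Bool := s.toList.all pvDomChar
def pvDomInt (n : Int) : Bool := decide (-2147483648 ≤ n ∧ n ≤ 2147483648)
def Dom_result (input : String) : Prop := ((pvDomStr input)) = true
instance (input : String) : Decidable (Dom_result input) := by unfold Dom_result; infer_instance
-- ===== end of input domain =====

-- B replaces A's incremental sliding-counter dict by a fresh len(set(slice)) == 4 test per
-- position (simpler); equal return value proved on Pre_ (a 4-distinct window exists).

-- ===== PORT A =====
-- A's loop: enumerate with a sliding defaultdict counter; on inputs with no window Python
-- returns None (no Int value) — those are outside Pre_result; the port yields 0 there.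
def resultLoopA (s : List Char) : List (Int × Char) → PySem.Dict Char Int → Int → Option Int
  | [], _, _ => none
  | (e, c) :: rest, seen, start =>
    let seen1 := seen.modify c 0 (· + 1)           -- seen[char] += 1
    let p : PySem.Dict Char Int × Int :=
      if e - start + 1 > 4 then
        let sc := PySem.List.pyGetD s start ' '    -- input[start]; start is always in range here
        let d1 := seen1.modify sc 0 (· - 1)        -- seen[input[start]] -= 1
        (if d1.getD sc 0 == 0 then d1.erase sc else d1, start + 1)
      else (seen1, start)
    if e - p.2 + 1 == 4 && (p.1.size == 4) then some (e + 1)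
    else resultLoopA s rest p.1 p.2

def result (input : String) : Int :=
  (resultLoopA input.toList (PySem.List.enumerate input.toList) PySem.Dict.empty 0).getD 0

-- ===== PORT B =====
def resultLoopB (s : List Char) : List Int → Option Int
  | [] => none
  | i :: rest =>
    if (PySem.Set.ofList (PySem.List.slice s (some (i - 4)) (some i))).length == 4 then some i
    else resultLoopB s rest

def result_alt (input : String) : Int :=
  (resultLoopB input.toList (PySem.List.pyRange 4 ((input.toList.length : Int) + 1) 1)).getD 0

-- ===== PRECONDITION & SPEC =====
-- Pre_ excludes exactly the inputs with no window of 4 pairwise-distinct characters: there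
-- Python's A (and B) falls through and returns None, which is not a value of type int.
def Pre_result (input : String) : Prop :=
  ∃ i < input.toList.length, i + 4 ≤ input.toList.length ∧ ((input.toList.drop i).take 4).Nodup

instance (input : String) : Decidable (Pre_result input) := by unfold Pre_result; infer_instance

def pvWitness_result : String := "abcd"

def Spec_result (input : String) (out : Int) : Prop := out = result_alt input
instance (input : String) (out : Int) : Decidable (Spec_result input out) := by unfold Spec_result; infer_instance

-- ===== CLAIM (what is proved, stated in full; the proofs are below) =====
def Claim_equal_result : Prop := ∀ (input : String), Dom_result input → Pre_result input → Spec_result input (result input)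

-- ===== LEMMAS AND PROOFS =====

-- The window A's dict counts at the start of iteration k: input[max(0,k-4):k].
def pvWin (s : List Char) (k : Nat) : List Char := (s.drop (k - 4)).take (k - (k - 4))

-- erase on a PySem.Dict is a filter on the items; basic lookup facts
lemma pv_find?_filter_ne {κ ν : Type} [BEq κ] [LawfulBEq κ] (l : List (κ × ν)) (k x : κ)
    (h : x ≠ k) :
    (l.filter (fun p => !(p.1 == k))).find? (fun p => p.1 == x) = l.find? (fun p => p.1 == x) := by
  induction l with
  | nil => rfl
  | cons hd tl ih =>
    by_cases hk : hd.1 = k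
    · have hx : (hd.1 == x) = false := by simp [hk]; exact fun hxx => h hxx.symm
      rw [List.filter_cons, show (!(hd.1 == k)) = false by simp [hk], if_neg (by simp)]
      rw [ih, List.find?]
      simp [hx]
    · simp only [List.filter_cons, show (!(hd.1 == k)) = true by simp [hk], if_pos]
      by_cases hx : hd.1 = x
      · simp [List.find?, hx]
      · simp [List.find?, hx, ih]

lemma pv_getD_erase_self {κ ν : Type} [BEq κ] [LawfulBEq κ] (d : PySem.Dict κ ν) (k : κ) (d0 : ν) :
    (d.erase k).getD k d0 = d0 := by
  have hf : (((d.erase k).items).find? (fun p => p.1 == k)) = none := by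
    rw [List.find?_eq_none]
    intro p hp
    have := List.of_mem_filter (p := fun q : κ × ν => !(q.1 == k)) hp
    simpa using this
  simp [PySem.Dict.getD, PySem.Dict.get?, hf]

lemma pv_getD_erase_ne {κ ν : Type} [BEq κ] [LawfulBEq κ] (d : PySem.Dict κ ν) (k x : κ) (d0 : ν)
    (h : x ≠ k) : (d.erase k).getD x d0 = d.getD x d0 := by
  simp only [PySem.Dict.getD, PySem.Dict.get?, PySem.Dict.erase]
  rw [pv_find?_filter_ne _ _ _ h]

lemma pv_contains_erase {κ ν : Type} [BEq κ] [LawfulBEq κ] (d : PySem.Dict κ ν) (k x : κ) :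
    (d.erase k).contains x = (!(x == k) && d.contains x) := by
  simp only [PySem.Dict.contains, PySem.Dict.erase, List.any_filter]
  by_cases h : x = k
  · subst h
    simp only [show (!(x == x)) = false from by simp, Bool.false_and]
    simp
  · simp only [show (!(x == k)) = true from by simp [h], Bool.true_and]
    congr 1
    funext p
    by_cases hpx : p.1 = x
    · simp [hpx, fun hxx : x = k => h hxx]
    · simp [hpx]

lemma pv_nodup_keys_erase {κ ν : Type} [BEq κ] (d : PySem.Dict κ ν) (k : κ)
    (h : d.keys.Nodup) : (d.erase k).keys.Nodup := by
  have hsub : (d.erase k).items.Sublist d.items := by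
    simp only [PySem.Dict.erase]
    exact List.filter_sublist
  simp only [PySem.Dict.keys] at h ⊢
  exact (hsub.map _).nodup h

-- a dict whose keys are exactly the distinct members of w has size |set(w)|
lemma pv_size_eq_ofList (d : PySem.Dict Char Int) (w : List Char) (hnd : d.keys.Nodup)
    (hmem : ∀ c, d.contains c = true ↔ c ∈ w) :
    d.size = (PySem.Set.ofList w).length := by
  have hperm : d.keys.Perm (PySem.Set.ofList w) := by
    rw [List.perm_ext_iff_of_nodup hnd (PySem.Set.nodup_ofList w)]
    intro c
    rw [← PySem.Dict.contains_iff_mem_keys, hmem, PySem.Set.mem_ofList]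
  have hlen : d.size = d.keys.length := by
    simp [PySem.Dict.size, PySem.Dict.keys]
  rw [hlen, hperm.length_eq]

-- the invariant survives seen[c] += 1 (window grows by c on the right)
lemma pvModifyInc (seen : PySem.Dict Char Int) (w : List Char) (c : Char)
    (hg : ∀ x, seen.getD x 0 = (w.count x : Int))
    (hm : ∀ x, seen.contains x = true ↔ x ∈ w)
    (hn : seen.keys.Nodup) :
    (∀ x, (seen.modify c 0 (· + 1)).getD x 0 = ((w ++ [c]).count x : Int)) ∧
    (∀ x, (seen.modify c 0 (· + 1)).contains x = true ↔ x ∈ w ++ [c]) ∧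
    (seen.modify c 0 (· + 1)).keys.Nodup := by
  refine ⟨?_, ?_, ?_⟩
  · intro x
    rw [PySem.Dict.getD_modify]
    by_cases hx : x = c
    · subst hx
      simp [hg, List.count_append]
    · simp [hx, hg, List.count_append, List.count_singleton, Ne.symm hx]
  · intro x
    rw [PySem.Dict.contains_modify]
    simp [hm, List.mem_append, or_comm]
  · rw [PySem.Dict.keys_modify]
    exact PySem.Dict.nodup_keys_insert _ _ _ hn

-- the invariant survives the shrink step (decrement the departing char, delete it at 0)
lemma pvShrink (seen1 : PySem.Dict Char Int) (w2 : List Char) (sc : Char)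
    (hg : ∀ x, seen1.getD x 0 = ((sc :: w2).count x : Int))
    (hm : ∀ x, seen1.contains x = true ↔ x ∈ sc :: w2)
    (hn : seen1.keys.Nodup) :
    (∀ x, ((if (seen1.modify sc 0 (· - 1)).getD sc 0 == 0 then (seen1.modify sc 0 (· - 1)).erase sc
            else seen1.modify sc 0 (· - 1)).getD x 0) = (w2.count x : Int)) ∧
    (∀ x, ((if (seen1.modify sc 0 (· - 1)).getD sc 0 == 0 then (seen1.modify sc 0 (· - 1)).erase sc
            else seen1.modify sc 0 (· - 1)).contains x) = true ↔ x ∈ w2) ∧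
    ((if (seen1.modify sc 0 (· - 1)).getD sc 0 == 0 then (seen1.modify sc 0 (· - 1)).erase sc
      else seen1.modify sc 0 (· - 1)).keys.Nodup) := by
  have hd1g : ∀ x, (seen1.modify sc 0 (· - 1)).getD x 0 = (w2.count x : Int) := by
    intro x
    rw [PySem.Dict.getD_modify]
    by_cases hx : x = sc
    · subst hx
      simp [hg, List.count_cons_self]
    · rw [if_neg hx, hg, List.count_cons, show (sc == x) = false from by
        simp only [beq_eq_false_iff_ne]; exact fun hxx => hx hxx.symm]
      simp
  have hd1m : ∀ x, (seen1.modify sc 0 (· - 1)).contains x = true ↔ x ∈ sc :: w2 := by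
    intro x
    rw [PySem.Dict.contains_modify]
    simp [hm]
  have hd1n : (seen1.modify sc 0 (· - 1)).keys.Nodup := by
    rw [PySem.Dict.keys_modify]
    exact PySem.Dict.nodup_keys_insert _ _ _ hn
  by_cases hsc : sc ∈ w2
  · have hpos : (seen1.modify sc 0 (· - 1)).getD sc 0 ≠ 0 := by
      rw [hd1g]
      have := List.count_pos_iff.2 hsc
      omega
    rw [if_neg (by simpa using hpos)]
    refine ⟨hd1g, ?_, hd1n⟩
    intro x
    rw [hd1m]
    constructor
    · intro hxm
      rcases List.mem_cons.1 hxm with h | h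
      · subst h; exact hsc
      · exact h
    · exact fun h => List.mem_cons_of_mem _ h
  · have hzero : (seen1.modify sc 0 (· - 1)).getD sc 0 = 0 := by
      rw [hd1g, List.count_eq_zero.2 hsc]
      rfl
    rw [if_pos (by simpa using hzero)]
    refine ⟨?_, ?_, pv_nodup_keys_erase _ _ hd1n⟩
    · intro x
      by_cases hx : x = sc
      · subst hx
        rw [pv_getD_erase_self, List.count_eq_zero.2 hsc]
        rfl
      · rw [pv_getD_erase_ne _ _ _ _ hx, hd1g]
    · intro x
      rw [pv_contains_erase]
      by_cases hx : x = sc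
      · subst hx
        simp [hsc]
      · simp only [show (x == sc) = false by simp [hx], Bool.not_false, Bool.true_and]
        rw [hd1m]
        simp [hx]

-- pvWin growth facts
lemma pvWin_succ_lt (s : List Char) (k : Nat) (h4 : k < 4) (hk : k < s.length) :
    pvWin s k ++ [s[k]] = pvWin s (k + 1) := by
  unfold pvWin
  rw [show k - 4 = 0 by omega, show k + 1 - 4 = 0 by omega, show k - 0 = k by omega,
      show k + 1 - 0 = k + 1 by omega]
  simp only [List.drop_zero]
  rw [List.take_succ, List.getElem?_eq_getElem hk]
  rfl

lemma pvWin_succ_ge (s : List Char) (k : Nat) (h4 : 4 ≤ k) (hk : k < s.length) :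
    pvWin s k ++ [s[k]] = s[k - 4]'(by omega) :: pvWin s (k + 1) := by
  unfold pvWin
  rw [show k - (k - 4) = 4 by omega, show k + 1 - 4 = k - 3 by omega,
      show k + 1 - (k - 3) = 4 by omega]
  have hlen : 4 < (s.drop (k - 4)).length := by
    rw [List.length_drop]; omega
  have h5 : (s.drop (k - 4)).take (4 + 1) = (s.drop (k - 4)).take 4 ++ [s[k]] := by
    rw [List.take_succ (i := 4), List.getElem?_eq_getElem hlen]
    simp only [List.getElem_drop, Option.toList_some]
    congr 3
    omega
  rw [← h5, List.drop_eq_getElem_cons (show k - 4 < s.length by omega)]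
  rw [show k - 4 + 1 = k - 3 by omega, List.take_succ_cons]

-- main loop alignment: A from iteration k (with its invariant state) equals B from index k+1
lemma pvMain (s : List Char) : ∀ (m k : Nat), s.length ≤ k + m →
    ∀ (seen : PySem.Dict Char Int),
    (∀ c, seen.getD c 0 = ((pvWin s k).count c : Int)) →
    (∀ c, seen.contains c = true ↔ c ∈ pvWin s k) →
    seen.keys.Nodup →
    resultLoopA s (PySem.List.enumerate (s.drop k) (k : Int)) seen ((k - 4 : Nat) : Int)
      = resultLoopB s (PySem.List.pyRange ((max 4 (k + 1) : Nat) : Int) ((s.length : Int) + 1) 1) := by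
  intro m
  induction m with
  | zero =>
    intro k hk seen _ _ _
    rw [List.drop_eq_nil_of_le (by omega), PySem.List.enumerate_nil,
        PySem.List.pyRange_one_eq_nil (by omega)]
    rfl
  | succ m ih =>
    intro k hk seen hg hm hn
    by_cases hkn : s.length ≤ k
    · rw [List.drop_eq_nil_of_le hkn, PySem.List.enumerate_nil,
          PySem.List.pyRange_one_eq_nil (by omega)]
      rfl
    · push_neg at hkn
      rw [List.drop_eq_getElem_cons hkn, PySem.List.enumerate_cons]
      simp only [resultLoopA]
      obtain ⟨hg1, hm1, hn1⟩ := pvModifyInc seen (pvWin s k) s[k] hg hm hn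
      by_cases h4 : 4 ≤ k
      · -- k ≥ 4 : the window slides (shrink branch taken)
        rw [if_pos (show ((k : Nat) : Int) - ((k - 4 : Nat) : Int) + 1 > 4 by omega)]
        have hsc : PySem.List.pyGetD s ((k - 4 : Nat) : Int) ' ' = s[k - 4]'(by omega) := by
          rw [PySem.List.pyGetD_natCast]
          exact List.getD_eq_getElem _ _ (by omega)
        rw [hsc]
        dsimp only
        rw [pvWin_succ_ge s k h4 hkn] at hg1 hm1
        obtain ⟨hg2, hm2, hn2⟩ := pvShrink _ _ _ hg1 hm1 hn1
        rw [show ((k : Nat) : Int) - (((k - 4 : Nat) : Int) + 1) + 1 = 4 by omega]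
        simp only [beq_self_eq_true, Bool.true_and]
        rw [pv_size_eq_ofList _ _ hn2 hm2]
        rw [show ((max 4 (k + 1) : Nat) : Int) = ((k : Nat) : Int) + 1 by
          rw [Nat.max_eq_right (by omega)]; push_cast; ring]
        rw [PySem.List.pyRange_one_cons (show ((k : Nat) : Int) + 1 < ((s.length : Nat) : Int) + 1 by omega)]
        simp only [resultLoopB]
        have hslice : PySem.List.slice s (some (((k : Nat) : Int) + 1 - 4)) (some (((k : Nat) : Int) + 1))
            = pvWin s (k + 1) := by
          rw [show ((k : Nat) : Int) + 1 - 4 = ((k - 3 : Nat) : Int) by omega,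
              show ((k : Nat) : Int) + 1 = ((k + 1 : Nat) : Int) by push_cast; ring,
              PySem.List.slice_natCast, pvWin, show k + 1 - 4 = k - 3 by omega]
        rw [hslice]
        by_cases hc : ((PySem.Set.ofList (pvWin s (k + 1))).length == 4) = true
        · rw [if_pos hc, if_pos hc]
        · rw [if_neg hc, if_neg hc]
          rw [show ((k : Nat) : Int) + 1 + 1 = ((max 4 (k + 1 + 1) : Nat) : Int) by
                rw [Nat.max_eq_right (by omega)]; push_cast; ring,
              show (((k - 4 : Nat) : Int) + 1) = ((k + 1 - 4 : Nat) : Int) by omega,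
              show ((k : Nat) : Int) + 1 = ((k + 1 : Nat) : Int) by push_cast; ring]
          exact ih (k + 1) (by omega) _ hg2 hm2 hn2
      · -- k < 4 : no shrink
        rw [if_neg (show ¬(((k : Nat) : Int) - ((k - 4 : Nat) : Int) + 1 > 4) by omega)]
        dsimp only
        rw [pvWin_succ_lt s k (by omega) hkn] at hg1 hm1
        by_cases h3 : k = 3
        · subst h3
          rw [show (((3 : Nat) : Int)) - ((3 - 4 : Nat) : Int) + 1 = 4 by norm_num]
          simp only [beq_self_eq_true, Bool.true_and]
          rw [pv_size_eq_ofList _ _ hn1 hm1]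
          rw [show ((max 4 (3 + 1) : Nat) : Int) = 4 by norm_num]
          rw [PySem.List.pyRange_one_cons (show (4 : Int) < ((s.length : Nat) : Int) + 1 by omega)]
          simp only [resultLoopB]
          have hslice : PySem.List.slice s (some ((4 : Int) - 4)) (some (4 : Int))
              = pvWin s (3 + 1) := by
            rw [show (4 : Int) - 4 = ((0 : Nat) : Int) by norm_num,
                show (4 : Int) = ((4 : Nat) : Int) by norm_num,
                PySem.List.slice_natCast, pvWin]
          rw [hslice]
          by_cases hc : ((PySem.Set.ofList (pvWin s (3 + 1))).length == 4) = true
          · rw [if_pos hc, if_pos hc]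
            norm_num
          · rw [if_neg hc, if_neg hc]
            rw [show (4 : Int) + 1 = ((max 4 (3 + 1 + 1) : Nat) : Int) by norm_num,
                show (((3 : Nat) : Int) + 1) = ((3 + 1 : Nat) : Int) by norm_num,
                show ((3 - 4 : Nat) : Int) = ((3 + 1 - 4 : Nat) : Int) by norm_num]
            exact ih (3 + 1) (by omega) _ hg1 hm1 hn1
        · -- k ≤ 2 : the window is still shorter than 4, A's check fails, B has not started
          rw [show (((k : Nat) : Int) - ((k - 4 : Nat) : Int) + 1 == 4) = false by
            rw [beq_eq_false_iff_ne]; omega]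
          rw [Bool.false_and, if_neg Bool.false_ne_true]
          rw [show ((max 4 (k + 1) : Nat) : Int) = ((max 4 (k + 1 + 1) : Nat) : Int) by
            rw [Nat.max_eq_left (by omega), Nat.max_eq_left (by omega)],
            show ((k : Nat) : Int) + 1 = ((k + 1 : Nat) : Int) by push_cast; ring,
            show ((k - 4 : Nat) : Int) = ((k + 1 - 4 : Nat) : Int) by omega]
          exact ih (k + 1) (by omega) _ hg1 hm1 hn1

-- ===== VERDICT (by name: the statement is the Claim_ definition above) =====
theorem result_spec : Claim_equal_result := by
  intro input _ _
  unfold Spec_result result result_alt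
  have h := pvMain input.toList input.toList.length 0 (by omega) PySem.Dict.empty
    (by intro c; simp [PySem.Dict.getD_empty, pvWin]) 
    (by intro c; simp [PySem.Dict.contains_empty, pvWin])
    PySem.Dict.nodup_keys_empty
  norm_num at h
  rw [h]
  simp
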